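-- pv_equiv track=rewrite | github.com/ABrasburg/TDA-respuestas | Examenes/2023c1-1/Ej2.py | faros
-- ===== SOURCE A (Python) =====
-- def faros(matriz):
--     n = len(matriz)
--     m = len(matriz[0])
--     faros = 0
--     for i in range(n):
--         for j in range(m):
--             if matriz[i][j] == 1:
--                 faros += 1
--                 for x in range(i-2, i+3):
--                     for y in range(j-2, j+3):
--                         if x >= 0 and x < n and y >= 0 and y < m:
--                             matriz[x][y] = 0
--     return faros
-- ===== SOURCE B (Python) =====
-- def faros(matriz):
--     n = len(matriz)
--     m = len(matriz[0])
--     centros = []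
--     cuenta = 0
--     for i in range(n):
--         for j in range(m):
--             if matriz[i][j] == 1 and all(abs(i - si) > 2 or abs(j - sj) > 2 for si, sj in centros):
--                 cuenta += 1
--                 centros.append((i, j))
--     return cuenta
-- ===== Notes on version B (the rewrite author's own statement) =====
-- stated objective: simpler
-- what changed: B never mutates or re-reads a cleared matrix: it keeps a list of selected lighthouse centres and counts a 1-cell iff no earlier centre is within Chebyshev distance 2, instead of A's in-place 5x5 zeroing of the matrix after each hit.
import Mathlib
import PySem

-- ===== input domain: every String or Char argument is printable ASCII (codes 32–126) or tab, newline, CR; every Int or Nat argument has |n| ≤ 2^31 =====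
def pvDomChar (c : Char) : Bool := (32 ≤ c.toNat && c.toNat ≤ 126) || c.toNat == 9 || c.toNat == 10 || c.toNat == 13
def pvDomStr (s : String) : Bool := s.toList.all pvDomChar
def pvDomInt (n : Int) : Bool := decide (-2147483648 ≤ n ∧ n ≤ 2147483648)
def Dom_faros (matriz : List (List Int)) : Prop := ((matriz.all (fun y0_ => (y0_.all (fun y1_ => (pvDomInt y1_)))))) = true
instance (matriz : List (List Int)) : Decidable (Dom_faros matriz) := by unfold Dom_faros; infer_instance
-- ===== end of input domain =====

-- B replaces A's in-place 5x5 clearing of the matrix by a list of selected centres tested with a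
-- Chebyshev-distance predicate (objective: simpler, no mutation). Equivalence is about the RETURN
-- value only: Python A zeroes cells of `matriz` in place, Python B does not mutate its argument.

-- ===== PORT A =====
-- matriz[i][j] for nonnegative in-range indices (Pre_ keeps execution in range; default never read inside Pre_)
def pvCell (mat : List (List Int)) (i j : Int) : Int :=
  (PySem.List.pyGet? ((PySem.List.pyGet? mat i).getD []) j).getD 0

-- matriz[x][y] = 0 (used only under the guard 0 <= x, 0 <= y)
def pvSetCell (mat : List (List Int)) (x y : Int) : List (List Int) :=
  mat.set x.toNat ((mat.getD x.toNat []).set y.toNat 0)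

-- the two innermost loops of A: zero the in-bounds part of the 5x5 block around (i, j)
def pvClear (n m : Int) (mat : List (List Int)) (i j : Int) : List (List Int) :=
  (PySem.List.pyRange (i-2) (i+3) 1).foldl (fun mat x =>
    (PySem.List.pyRange (j-2) (j+3) 1).foldl (fun mat y =>
      if 0 ≤ x ∧ x < n ∧ 0 ≤ y ∧ y < m then pvSetCell mat x y else mat) mat) mat

-- body of A's inner j-loop; state = (matriz, faros)
def pvInnerA (n m i : Int) (st : List (List Int) × Int) (j : Int) : List (List Int) × Int :=
  if pvCell st.1 i j = 1 then (pvClear n m st.1 i j, st.2 + 1) else st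

def faros (matriz : List (List Int)) : Int :=
  let n : Int := matriz.length
  let m : Int := ((PySem.List.pyGet? matriz 0).getD []).length
  ((PySem.List.pyRange 0 n 1).foldl (fun st i =>
    (PySem.List.pyRange 0 m 1).foldl (pvInnerA n m i) st) (matriz, 0)).2

-- ===== PORT B =====
-- abs(i-si) > 2 or abs(j-sj) > 2 for one centre
def pvFar (i j : Int) (c : Int × Int) : Bool :=
  decide (2 < |i - c.1|) || decide (2 < |j - c.2|)

-- body of B's inner j-loop; state = (centros, cuenta)
def pvInnerB (matriz : List (List Int)) (i : Int) (st : List (Int × Int) × Int) (j : Int) :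
    List (Int × Int) × Int :=
  if (pvCell matriz i j == 1) && st.1.all (pvFar i j) then (st.1 ++ [(i, j)], st.2 + 1) else st

def faros_alt (matriz : List (List Int)) : Int :=
  let n : Int := matriz.length
  let m : Int := ((PySem.List.pyGet? matriz 0).getD []).length
  ((PySem.List.pyRange 0 n 1).foldl (fun st i =>
    (PySem.List.pyRange 0 m 1).foldl (pvInnerB matriz i) st) (([] : List (Int × Int)), (0 : Int))).2

-- ===== PRECONDITION & SPEC =====
-- Pre_ excludes exactly the inputs where Python A raises IndexError: the empty matrix
-- (len(matriz[0])) and matrices with a row shorter than row 0 (reads/writes at columns < m).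
def Pre_faros (matriz : List (List Int)) : Prop :=
  matriz ≠ [] ∧ ∀ row ∈ matriz, (matriz.headD []).length ≤ row.length
instance (matriz : List (List Int)) : Decidable (Pre_faros matriz) := by unfold Pre_faros; infer_instance

def pvWitness_faros : List (List Int) := [[1, 0], [0, 1]]

def Spec_faros (matriz : List (List Int)) (out : Int) : Prop := out = faros_alt matriz
instance (matriz : List (List Int)) (out : Int) : Decidable (Spec_faros matriz out) := by unfold Spec_faros; infer_instance

-- ===== CLAIM (what is proved, stated in full; the proofs are below) =====
def Claim_equal_faros : Prop := ∀ (matriz : List (List Int)), Dom_faros matriz → Pre_faros matriz → Spec_faros matriz (faros matriz)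

-- ===== LEMMAS AND PROOFS =====

-- a cell is within Chebyshev distance 2 of one of the centres
def pvCovered (cs : List (Int × Int)) (x y : Int) : Bool :=
  cs.any (fun c => decide (|x - c.1| ≤ 2 ∧ |y - c.2| ≤ 2))

-- the matrix `mat` has the same shape as `orig`
def pvShape (orig mat : List (List Int)) : Prop :=
  mat.length = orig.length ∧ ∀ k : Nat, (mat.getD k []).length = (orig.getD k []).length

-- n, m are consistent bounds for `orig` (from Pre_)
def pvGood (orig : List (List Int)) (n m : Int) : Prop :=
  n = (orig.length : Int) ∧ 0 ≤ m ∧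
    ∀ k : Nat, k < orig.length → m ≤ ((orig.getD k []).length : Int)

-- simulation invariant between A's state and B's state
def pvStInv (orig : List (List Int)) (n m : Int)
    (A : List (List Int) × Int) (B : List (Int × Int) × Int) : Prop :=
  pvShape orig A.1 ∧ A.2 = B.2 ∧
    ∀ x y : Int, 0 ≤ x → x < n → 0 ≤ y → y < m →
      pvCell A.1 x y = if pvCovered B.1 x y then 0 else pvCell orig x y

theorem pvCell_nonneg (mat : List (List Int)) (x y : Int) (hx : 0 ≤ x) (hy : 0 ≤ y) :
    pvCell mat x y = (((mat[x.toNat]?).getD [])[y.toNat]?).getD 0 := by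
  simp [pvCell, PySem.List.pyGet?_of_nonneg _ hx, PySem.List.pyGet?_of_nonneg _ hy]

theorem pvSetCell_rowlen (mat : List (List Int)) (x y : Int) (k : Nat) :
    ((pvSetCell mat x y).getD k []).length = (mat.getD k []).length := by
  simp only [pvSetCell, List.getD_eq_getElem?_getD, List.getElem?_set]
  split_ifs with h1 h2
  · subst h1
    simp [List.getElem?_eq_getElem h2]
  · subst h1
    simp [List.getElem?_eq_none (by omega : mat.length ≤ x.toNat)]
  · rfl

theorem pvShape_setCell (orig mat : List (List Int)) (x y : Int) (h : pvShape orig mat) :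
    pvShape orig (pvSetCell mat x y) := by
  obtain ⟨h1, h2⟩ := h
  exact ⟨by simpa [pvSetCell] using h1, fun k => by rw [pvSetCell_rowlen]; exact h2 k⟩

theorem pvCell_setCell (mat : List (List Int)) (x' y' x y : Int)
    (hx' : 0 ≤ x') (hx'b : x'.toNat < mat.length)
    (hy' : 0 ≤ y') (hy'b : y'.toNat < (mat.getD x'.toNat []).length)
    (hx : 0 ≤ x) (hy : 0 ≤ y) :
    pvCell (pvSetCell mat x' y') x y = if x = x' ∧ y = y' then 0 else pvCell mat x y := by
  rw [pvCell_nonneg _ _ _ hx hy, pvCell_nonneg _ _ _ hx hy]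
  simp only [pvSetCell, List.getElem?_set, List.getD_eq_getElem?_getD]
  by_cases hxx : x = x'
  · subst hxx
    rw [if_pos rfl, if_pos hx'b]
    simp only [Option.getD_some, List.getElem?_set]
    by_cases hyy : y = y'
    · subst hyy
      rw [if_pos rfl, if_pos (by simp only [List.getD_eq_getElem?_getD] at hy'b; exact hy'b)]
      simp
    · rw [if_neg (by omega : ¬ y'.toNat = y.toNat), if_neg (by tauto)]
  · rw [if_neg (by omega : ¬ x'.toNat = x.toNat), if_neg (by tauto)]

theorem pvClearInner_shape (orig : List (List Int)) (n m xv : Int) (ys : List Int) :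
    ∀ mat, pvShape orig mat →
      pvShape orig (ys.foldl (fun mat yv =>
        if 0 ≤ xv ∧ xv < n ∧ 0 ≤ yv ∧ yv < m then pvSetCell mat xv yv else mat) mat) := by
  induction ys with
  | nil => exact fun mat h => h
  | cons yv t ih =>
    intro mat h
    simp only [List.foldl_cons]
    split_ifs
    · exact ih _ (pvShape_setCell _ _ _ _ h)
    · exact ih _ h

theorem pvClear_shape (orig : List (List Int)) (n m i j : Int) (mat : List (List Int))
    (h : pvShape orig mat) : pvShape orig (pvClear n m mat i j) := by
  unfold pvClear
  generalize PySem.List.pyRange (i-2) (i+3) 1 = xs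
  induction xs generalizing mat with
  | nil => exact h
  | cons xv t ih =>
    simp only [List.foldl_cons]
    exact ih _ (pvClearInner_shape orig n m xv _ mat h)

theorem pvClear_cell (orig : List (List Int)) (n m : Int) (hg : pvGood orig n m)
    (i j : Int) (mat : List (List Int)) (hsh : pvShape orig mat)
    (x y : Int) (hx : 0 ≤ x) (hxn : x < n) (hy : 0 ≤ y) (hym : y < m) :
    pvCell (pvClear n m mat i j) x y =
      if |x - i| ≤ 2 ∧ |y - j| ≤ 2 then 0 else pvCell mat x y := by
  have houter : ∀ (xs ys : List Int) (mat : List (List Int)), pvShape orig mat →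
      pvCell (xs.foldl (fun mat xv => ys.foldl (fun mat yv =>
          if 0 ≤ xv ∧ xv < n ∧ 0 ≤ yv ∧ yv < m then pvSetCell mat xv yv else mat) mat) mat) x y =
        if x ∈ xs ∧ y ∈ ys then 0 else pvCell mat x y := by
    have hinner : ∀ (xv : Int) (ys : List Int) (mat : List (List Int)), pvShape orig mat →
        pvCell (ys.foldl (fun mat yv =>
            if 0 ≤ xv ∧ xv < n ∧ 0 ≤ yv ∧ yv < m then pvSetCell mat xv yv else mat) mat) x y =
          if x = xv ∧ y ∈ ys then 0 else pvCell mat x y := by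
      intro xv ys
      induction ys with
      | nil => intro mat _; simp
      | cons yv t ih =>
        intro mat hm
        simp only [List.foldl_cons]
        by_cases hgd : 0 ≤ xv ∧ xv < n ∧ 0 ≤ yv ∧ yv < m
        · rw [if_pos hgd]
          rw [ih (pvSetCell mat xv yv) (pvShape_setCell orig mat xv yv hm)]
          rw [pvCell_setCell mat xv yv x y hgd.1
            (by obtain ⟨h1, _, _⟩ := hg; obtain ⟨hl, _⟩ := hm; omega)
            hgd.2.2.1
            (by
              obtain ⟨h1, _, h3⟩ := hg
              obtain ⟨hl, hr⟩ := hm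
              have hk : xv.toNat < orig.length := by omega
              have := h3 xv.toNat hk
              have := hr xv.toNat
              omega)
            hx hy]
          by_cases h1 : x = xv <;> by_cases h2 : y = yv <;> by_cases h3 : y ∈ t <;>
            simp_all [List.mem_cons]
        · rw [if_neg hgd, ih _ hm]
          by_cases h1 : x = xv <;> by_cases h2 : y = yv <;> by_cases h3 : y ∈ t <;>
            simp_all [List.mem_cons]
    intro xs ys
    induction xs with
    | nil => intro mat _; simp
    | cons xv t ih =>
      intro mat hm
      simp only [List.foldl_cons]
      rw [ih _ (pvClearInner_shape orig n m xv ys mat hm), hinner xv ys mat hm]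
      by_cases h1 : x = xv <;> by_cases h2 : x ∈ t <;> by_cases h3 : y ∈ ys <;>
        simp_all [List.mem_cons]
  unfold pvClear
  rw [houter _ _ mat hsh]
  simp only [PySem.List.mem_pyRange_one, abs_le]
  split_ifs with h1 h2 h2 <;> first | rfl | omega

theorem pvAll_far_eq (cs : List (Int × Int)) (i j : Int) :
    cs.all (pvFar i j) = !(pvCovered cs i j) := by
  induction cs with
  | nil => rfl
  | cons c t ih =>
    simp only [List.all_cons, List.any_cons, pvCovered] at *
    rw [ih]
    cases h : pvFar i j c <;> simp_all [pvFar]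

theorem pvInner_sim (orig : List (List Int)) (n m : Int) (hg : pvGood orig n m)
    (i : Int) (hi : 0 ≤ i) (hin : i < n) (js : List Int)
    (hjs : ∀ j ∈ js, 0 ≤ j ∧ j < m) :
    ∀ A B, pvStInv orig n m A B →
      pvStInv orig n m (js.foldl (pvInnerA n m i) A) (js.foldl (pvInnerB orig i) B) := by
  induction js with
  | nil => exact fun A B h => h
  | cons j t ih =>
    intro A B h
    have hj := hjs j (by simp)
    obtain ⟨hsh, hcnt, hcell⟩ := h
    have hAij : pvCell A.1 i j = if pvCovered B.1 i j then 0 else pvCell orig i j :=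
      hcell i j hi hin hj.1 hj.2
    have hjs' : ∀ j ∈ t, 0 ≤ j ∧ j < m := fun x hx => hjs x (by simp [hx])
    simp only [List.foldl_cons]
    cases hcov : pvCovered B.1 i j with
    | true =>
      have hA : pvInnerA n m i A j = A := by
        simp [pvInnerA, hAij, hcov]
      have hB : pvInnerB orig i B j = B := by
        simp [pvInnerB, pvAll_far_eq, hcov]
      rw [hA, hB]
      exact ih hjs' A B ⟨hsh, hcnt, hcell⟩
    | false =>
      simp only [hcov, Bool.false_eq_true, if_false] at hAij
      by_cases h1 : pvCell orig i j = 1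
      · have hA : pvInnerA n m i A j = (pvClear n m A.1 i j, A.2 + 1) := by
          simp [pvInnerA, hAij, h1]
        have hB : pvInnerB orig i B j = (B.1 ++ [(i, j)], B.2 + 1) := by
          simp [pvInnerB, pvAll_far_eq, hcov, h1]
        rw [hA, hB]
        refine ih hjs' _ _
          ⟨pvClear_shape orig n m i j A.1 hsh, by simp [hcnt], ?_⟩
        intro x y hx hxn hy hym
        rw [pvClear_cell orig n m hg i j A.1 hsh x y hx hxn hy hym]
        have hcellxy := hcell x y hx hxn hy hym
        have happ : pvCovered (B.1 ++ [(i, j)]) x y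
            = (pvCovered B.1 x y || decide (|x - i| ≤ 2 ∧ |y - j| ≤ 2)) := by
          simp [pvCovered, List.any_append]
        rw [happ]
        by_cases hnear : |x - i| ≤ 2 ∧ |y - j| ≤ 2
        · simp [hnear]
        · rw [if_neg hnear, hcellxy]
          simp [hnear]
      · have hA : pvInnerA n m i A j = A := by simp [pvInnerA, hAij, h1]
        have hB : pvInnerB orig i B j = B := by simp [pvInnerB, h1]
        rw [hA, hB]
        exact ih hjs' A B ⟨hsh, hcnt, hcell⟩

theorem pvOuter_sim (orig : List (List Int)) (n m : Int) (hg : pvGood orig n m)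
    (is : List Int) (his : ∀ i ∈ is, 0 ≤ i ∧ i < n) :
    ∀ A B, pvStInv orig n m A B →
      pvStInv orig n m
        (is.foldl (fun st i => (PySem.List.pyRange 0 m 1).foldl (pvInnerA n m i) st) A)
        (is.foldl (fun st i => (PySem.List.pyRange 0 m 1).foldl (pvInnerB orig i) st) B) := by
  intro A B h
  induction is generalizing A B with
  | nil => exact h
  | cons i t ih =>
    have hi := his i (by simp)
    refine ih (fun x hx => his x (by simp [hx])) _ _ ?_
    exact pvInner_sim orig n m hg i hi.1 hi.2 _
      (fun j hj => (PySem.List.mem_pyRange_one.mp hj).imp id id) A B h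

-- ===== VERDICT (by name: the statement is the Claim_ definition above) =====
theorem faros_spec : Claim_equal_faros := by
  intro matriz _ hpre
  obtain ⟨hne, hrows⟩ := hpre
  unfold Spec_faros faros faros_alt
  obtain ⟨h0, t0, rfl⟩ : ∃ h t, matriz = h :: t := by
    cases matriz with
    | nil => exact absurd rfl hne
    | cons h t => exact ⟨h, t, rfl⟩
  set orig := h0 :: t0 with horig
  have hm0 : (PySem.List.pyGet? orig 0).getD [] = h0 := by
    rw [PySem.List.pyGet?_zero, horig]; rfl
  rw [hm0]
  have hg : pvGood orig (orig.length : Int) (h0.length : Int) := by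
    refine ⟨rfl, by positivity, fun k hk => ?_⟩
    have hmem : orig.getD k [] ∈ orig := by
      rw [List.getD_eq_getElem?_getD, List.getElem?_eq_getElem hk]
      exact List.getElem_mem hk
    have := hrows _ hmem
    simp only [horig, List.headD_cons] at this
    exact_mod_cast this
  have h0inv : pvStInv orig (orig.length : Int) (h0.length : Int) (orig, 0) ([], 0) := by
    refine ⟨⟨rfl, fun _ => rfl⟩, rfl, fun x y _ _ _ _ => ?_⟩
    simp [pvCovered]
  have := pvOuter_sim orig (orig.length : Int) (h0.length : Int) hg
    (PySem.List.pyRange 0 (orig.length : Int) 1)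
    (fun i hi => PySem.List.mem_pyRange_one.mp hi)
    (orig, 0) ([], 0) h0inv
  exact this.2.1
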